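-- pv_equiv track=rewrite | github.com/Rimuwu/SEG-social-economic-game | api/modules/function_way.py | get_neighboring_cells
-- ===== SOURCE A (Python) =====
-- def get_neighboring_cells(x: int, y: int, radius: int, map_size: dict) -> list[tuple[int, int]]:
--     """Получает соседние клетки в радиусе от заданной координаты.
--
--     Args:
--         x: координата X
--         y: координата Y
--         radius: радиус поиска
--         map_size: размер карты {"rows": int, "cols": int}
--
--     Returns:
--         Список кортежей с координатами соседних клеток
--     """
--     neighbors = []
--     rows = map_size["rows"]
--     cols = map_size["cols"]
--
--     for dx in range(-radius, radius + 1):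
--         for dy in range(-radius, radius + 1):
--             # Пропускаем центральную клетку
--             if dx == 0 and dy == 0:
--                 continue
--
--             new_x = x + dx
--             new_y = y + dy
--
--             # Проверяем, что координаты в пределах карты
--             if 0 <= new_x < rows and 0 <= new_y < cols:
--                 neighbors.append((new_x, new_y))
--
--     return neighbors
-- ===== SOURCE B (Python) =====
-- def get_neighboring_cells(x: int, y: int, radius: int, map_size: dict) -> list[tuple[int, int]]:
--     """Dual algorithm: scan every cell of the map and keep those whose Chebyshev
--     distance to (x, y) is at most radius, skipping (x, y) itself."""
--     rows = map_size["rows"]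
--     cols = map_size["cols"]
--     neighbors = []
--     for nx in range(rows):
--         for ny in range(cols):
--             if max(abs(nx - x), abs(ny - y)) <= radius and (nx, ny) != (x, y):
--                 neighbors.append((nx, ny))
--     return neighbors
-- ===== Notes on version B (the rewrite author's own statement) =====
-- stated objective: alternative
-- what changed: B scans every cell of the map and keeps those within Chebyshev distance radius of (x,y), instead of enumerating all (2r+1)^2 offset pairs and bounds-filtering each; the iteration space is the map, not the radius square.
import Mathlib
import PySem

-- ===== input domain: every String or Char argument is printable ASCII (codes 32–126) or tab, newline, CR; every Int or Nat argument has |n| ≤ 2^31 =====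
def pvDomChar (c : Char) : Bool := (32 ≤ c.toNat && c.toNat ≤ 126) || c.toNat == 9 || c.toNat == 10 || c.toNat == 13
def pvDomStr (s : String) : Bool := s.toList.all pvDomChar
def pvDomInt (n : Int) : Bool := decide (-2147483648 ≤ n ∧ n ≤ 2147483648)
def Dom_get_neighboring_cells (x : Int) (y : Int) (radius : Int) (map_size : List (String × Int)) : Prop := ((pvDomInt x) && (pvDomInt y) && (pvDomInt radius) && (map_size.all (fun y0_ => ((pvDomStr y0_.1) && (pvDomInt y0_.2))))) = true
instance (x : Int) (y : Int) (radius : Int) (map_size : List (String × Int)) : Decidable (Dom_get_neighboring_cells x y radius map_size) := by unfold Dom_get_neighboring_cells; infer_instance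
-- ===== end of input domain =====

-- B scans the whole map grid and keeps cells within Chebyshev distance radius of (x,y);
-- A enumerates the (2r+1)^2 offset square and bounds-filters each cell. Same return value wherever A returns.

-- ===== PORT A =====
def get_neighboring_cells (x : Int) (y : Int) (radius : Int) (map_size : List (String × Int)) : List (Int × Int) :=
  match (PySem.Dict.mk map_size).get? "rows", (PySem.Dict.mk map_size).get? "cols" with
  | some rows, some cols =>
      (PySem.List.pyRange (-radius) (radius + 1) 1).foldl (fun neighbors dx =>
        (PySem.List.pyRange (-radius) (radius + 1) 1).foldl (fun neighbors dy =>
          if dx = 0 ∧ dy = 0 then neighbors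
          else
            let new_x := x + dx
            let new_y := y + dy
            if 0 ≤ new_x ∧ new_x < rows ∧ 0 ≤ new_y ∧ new_y < cols then
              neighbors ++ [(new_x, new_y)]
            else neighbors) neighbors) []
  | _, _ => []  -- Python raises KeyError here; excluded by Pre_

-- ===== PORT B =====
def get_neighboring_cells_alt (x : Int) (y : Int) (radius : Int) (map_size : List (String × Int)) : List (Int × Int) :=
  match (PySem.Dict.mk map_size).get? "rows" with
  | none => []  -- Python raises KeyError here; excluded by Pre_
  | some rows =>
    match (PySem.Dict.mk map_size).get? "cols" with
    | none => []  -- Python raises KeyError here; excluded by Pre_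
    | some cols =>
      (PySem.List.pyRange 0 rows 1).foldl (fun neighbors nx =>
        (PySem.List.pyRange 0 cols 1).foldl (fun neighbors ny =>
          if max |nx - x| |ny - y| ≤ radius ∧ ¬(nx = x ∧ ny = y) then
            neighbors ++ [(nx, ny)]
          else neighbors) neighbors) []

-- ===== PRECONDITION & SPEC =====
-- Pre_ excludes exactly the inputs on which Python A raises KeyError: a map_size lacking a
-- "rows" or "cols" entry (B raises the same KeyError there).
def Pre_get_neighboring_cells (x : Int) (y : Int) (radius : Int) (map_size : List (String × Int)) : Prop :=
  ((PySem.Dict.mk map_size).get? "rows").isSome ∧ ((PySem.Dict.mk map_size).get? "cols").isSome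
instance (x : Int) (y : Int) (radius : Int) (map_size : List (String × Int)) : Decidable (Pre_get_neighboring_cells x y radius map_size) := by unfold Pre_get_neighboring_cells; infer_instance

def pvWitness_get_neighboring_cells : Int × Int × Int × (List (String × Int)) :=
  (1, 1, 1, [("rows", 3), ("cols", 3)])

def Spec_get_neighboring_cells (x : Int) (y : Int) (radius : Int) (map_size : List (String × Int)) (out : List (Int × Int)) : Prop := out = get_neighboring_cells_alt x y radius map_size
instance (x : Int) (y : Int) (radius : Int) (map_size : List (String × Int)) (out : List (Int × Int)) : Decidable (Spec_get_neighboring_cells x y radius map_size out) := by unfold Spec_get_neighboring_cells; infer_instance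

-- ===== CLAIM (what is proved, stated in full; the proofs are below) =====
def Claim_equal_get_neighboring_cells : Prop := ∀ (x : Int) (y : Int) (radius : Int) (map_size : List (String × Int)), Dom_get_neighboring_cells x y radius map_size → Pre_get_neighboring_cells x y radius map_size → Spec_get_neighboring_cells x y radius map_size (get_neighboring_cells x y radius map_size)

-- ===== LEMMAS AND PROOFS =====

-- canonical middle form both ports are reduced to: clamped window as a nested flatMap
def pvCanon (x y r rows cols : Int) : List (Int × Int) :=
  (PySem.List.pyRange (max 0 (x - r)) (min (rows - 1) (x + r) + 1) 1).flatMap (fun nx =>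
    (PySem.List.pyRange (max 0 (y - r)) (min (cols - 1) (y + r) + 1) 1).flatMap (fun ny =>
      if ¬(nx = x ∧ ny = y) then [(nx, ny)] else []))

lemma filter_pyRange_clamp (a b lo hi : Int) :
    (PySem.List.pyRange a b 1).filter (fun v => decide (lo ≤ v) && decide (v < hi))
      = PySem.List.pyRange (max a lo) (min b hi) 1 := by
  apply List.Perm.eq_of_pairwise (le := (· < ·))
  · intro u v _ _ h1 h2; omega
  · exact List.Pairwise.sublist List.filter_sublist (PySem.List.pairwise_lt_pyRange_one _ _)
  · exact PySem.List.pairwise_lt_pyRange_one _ _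
  · rw [List.perm_ext_iff_of_nodup]
    · intro v
      simp [List.mem_filter, PySem.List.mem_pyRange_one]
      omega
    · exact List.Nodup.sublist List.filter_sublist (PySem.List.nodup_pyRange_one _ _)
    · exact PySem.List.nodup_pyRange_one _ _

lemma flatMap_guard (l : List Int) (q : Int → Bool) (h : Int → List (Int × Int)) :
    l.flatMap (fun v => if q v then h v else []) = (l.filter q).flatMap h := by
  induction l with
  | nil => simp
  | cons a t ih => cases hq : q a <;> simp [List.flatMap_cons, hq, ih]

lemma foldl_if_append_eq_flatMap (l : List Int) (p : Int → Prop) [DecidablePred p]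
    (f : Int → Int × Int) (acc : List (Int × Int)) :
    l.foldl (fun a v => if p v then a ++ [f v] else a) acc
      = acc ++ l.flatMap (fun v => if p v then [f v] else []) := by
  induction l generalizing acc with
  | nil => simp
  | cons a t ih => by_cases hp : p a <;> simp [hp, ih]

lemma fold2_to_flatMap (lx ly : List Int) (P : Int → Int → Prop) [∀ a b, Decidable (P a b)]
    (f : Int → Int → Int × Int) :
    lx.foldl (fun acc nx => ly.foldl (fun acc ny =>
        if P nx ny then acc ++ [f nx ny] else acc) acc) []
      = lx.flatMap (fun nx => ly.flatMap (fun ny => if P nx ny then [f nx ny] else [])) := by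
  have h1 : ∀ (nx : Int) (acc : List (Int × Int)),
      ly.foldl (fun acc ny => if P nx ny then acc ++ [f nx ny] else acc) acc
        = acc ++ ly.flatMap (fun ny => if P nx ny then [f nx ny] else []) :=
    fun nx acc => foldl_if_append_eq_flatMap ly (P nx) (f nx) acc
  calc lx.foldl _ [] = [] ++ lx.flatMap (fun nx => ly.flatMap (fun ny =>
          if P nx ny then [f nx ny] else [])) := by
        rw [← PySem.List.foldl_append_eq_flatMap]
        congr 1
        funext acc nx
        exact h1 nx acc
    _ = _ := by simp

lemma flatMap_pyRange_shift (t a b : Int) (g : Int → List (Int × Int)) :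
    (PySem.List.pyRange a b 1).flatMap (fun d => g (t + d))
      = (PySem.List.pyRange (t + a) (t + b) 1).flatMap g := by
  rw [PySem.List.pyRange_one a b, PySem.List.pyRange_one (t + a) (t + b)]
  have hb : (t + b - (t + a)).toNat = (b - a).toNat := by omega
  rw [hb, List.flatMap_map, List.flatMap_map]
  apply List.flatMap_congr
  intro k _
  simp [add_assoc]

-- per-row step: pull the nx-guard out as a boolean and clamp the inner range
lemma row_step (x y : Int) (nx la lb lo hi clo chi glo ghi : Int)
    (Q : Int → Prop) [DecidablePred Q]
    (hQ : ∀ ny, Q ny ↔ ((glo ≤ nx ∧ nx < ghi) ∧ (lo ≤ ny ∧ ny < hi) ∧ ¬(nx = x ∧ ny = y)))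
    (hclamp : (PySem.List.pyRange la lb 1).filter (fun v => decide (lo ≤ v) && decide (v < hi))
        = PySem.List.pyRange clo chi 1) :
    (PySem.List.pyRange la lb 1).flatMap (fun ny =>
        if Q ny then [((nx, ny) : Int × Int)] else [])
      = if (decide (glo ≤ nx) && decide (nx < ghi)) then
          (PySem.List.pyRange clo chi 1).flatMap
            (fun ny => if ¬(nx = x ∧ ny = y) then [(nx, ny)] else [])
        else [] := by
  by_cases hG : glo ≤ nx ∧ nx < ghi
  · rw [if_pos (by simp only [Bool.and_eq_true, decide_eq_true_eq]; exact hG)]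
    rw [← hclamp, ← flatMap_guard]
    apply List.flatMap_congr
    intro ny _
    by_cases hy1 : lo ≤ ny
    all_goals by_cases hy2 : ny < hi
    all_goals by_cases hc : nx = x ∧ ny = y
    all_goals simp [hQ, hG, hy1, hy2, hc]
  · rw [if_neg (by simp only [Bool.and_eq_true, decide_eq_true_eq]; tauto)]
    have h0 : ∀ ny ∈ PySem.List.pyRange la lb 1,
        (if Q ny then [((nx, ny) : Int × Int)] else []) = [] := by
      intro ny _
      rw [if_neg (by rw [hQ ny]; tauto)]
    rw [List.flatMap_congr h0]
    simp

lemma coreA (x y r rows cols : Int) :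
    (PySem.List.pyRange (-r) (r + 1) 1).foldl (fun neighbors dx =>
        (PySem.List.pyRange (-r) (r + 1) 1).foldl (fun neighbors dy =>
          if dx = 0 ∧ dy = 0 then neighbors
          else
            if 0 ≤ x + dx ∧ x + dx < rows ∧ 0 ≤ y + dy ∧ y + dy < cols then
              neighbors ++ [(x + dx, y + dy)]
            else neighbors) neighbors) []
    = pvCanon x y r rows cols := by
  have hfun : (fun (neighbors : List (Int × Int)) (dx : Int) =>
        (PySem.List.pyRange (-r) (r + 1) 1).foldl (fun neighbors dy =>
          if dx = 0 ∧ dy = 0 then neighbors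
          else if 0 ≤ x + dx ∧ x + dx < rows ∧ 0 ≤ y + dy ∧ y + dy < cols then
              neighbors ++ [(x + dx, y + dy)] else neighbors) neighbors)
      = (fun (neighbors : List (Int × Int)) (dx : Int) =>
        (PySem.List.pyRange (-r) (r + 1) 1).foldl (fun neighbors dy =>
          if ¬(dx = 0 ∧ dy = 0) ∧ 0 ≤ x + dx ∧ x + dx < rows ∧ 0 ≤ y + dy ∧ y + dy < cols then
              neighbors ++ [(x + dx, y + dy)] else neighbors) neighbors) := by
    funext acc dx
    congr 1
    funext a dy
    split_ifs <;> tauto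
  rw [hfun, fold2_to_flatMap (PySem.List.pyRange (-r) (r + 1) 1) (PySem.List.pyRange (-r) (r + 1) 1)
        (fun dx dy => ¬(dx = 0 ∧ dy = 0) ∧ 0 ≤ x + dx ∧ x + dx < rows ∧ 0 ≤ y + dy ∧ y + dy < cols)
        (fun dx dy => (x + dx, y + dy))]
  rw [show (PySem.List.pyRange (-r) (r + 1) 1).flatMap (fun dx =>
          (PySem.List.pyRange (-r) (r + 1) 1).flatMap (fun dy =>
            if ¬(dx = 0 ∧ dy = 0) ∧ 0 ≤ x + dx ∧ x + dx < rows ∧ 0 ≤ y + dy ∧ y + dy < cols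
            then [(x + dx, y + dy)] else []))
      = (PySem.List.pyRange (x + -r) (x + (r + 1)) 1).flatMap (fun nx =>
          (PySem.List.pyRange (y + -r) (y + (r + 1)) 1).flatMap (fun ny =>
            if ¬(nx = x ∧ ny = y) ∧ 0 ≤ nx ∧ nx < rows ∧ 0 ≤ ny ∧ ny < cols
            then [(nx, ny)] else [])) from ?_]
  · have step : ∀ nx : Int,
        (PySem.List.pyRange (y + -r) (y + (r + 1)) 1).flatMap (fun ny =>
            if ¬(nx = x ∧ ny = y) ∧ 0 ≤ nx ∧ nx < rows ∧ 0 ≤ ny ∧ ny < cols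
            then [((nx, ny) : Int × Int)] else [])
        = if (decide (0 ≤ nx) && decide (nx < rows)) then
            (PySem.List.pyRange (max 0 (y - r)) (min (cols - 1) (y + r) + 1) 1).flatMap
              (fun ny => if ¬(nx = x ∧ ny = y) then [(nx, ny)] else [])
          else [] := by
      intro nx
      apply row_step x y nx (y + -r) (y + (r + 1)) 0 cols _ _ 0 rows
      · intro ny
        constructor
        · rintro ⟨hc, h1, h2, h3, h4⟩
          exact ⟨⟨h1, h2⟩, ⟨h3, h4⟩, hc⟩
        · rintro ⟨⟨h1, h2⟩, ⟨h3, h4⟩, hc⟩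
          exact ⟨hc, h1, h2, h3, h4⟩
      · rw [filter_pyRange_clamp,
            show max (y + -r) 0 = max 0 (y - r) from by omega,
            show min (y + (r + 1)) cols = min (cols - 1) (y + r) + 1 from by omega]
    rw [List.flatMap_congr (fun nx _ => step nx), flatMap_guard, filter_pyRange_clamp,
        show max (x + -r) 0 = max 0 (x - r) from by omega,
        show min (x + (r + 1)) rows = min (rows - 1) (x + r) + 1 from by omega]
    rfl
  · rw [← flatMap_pyRange_shift x (-r) (r + 1)]
    apply List.flatMap_congr
    intro dx _
    rw [← flatMap_pyRange_shift y (-r) (r + 1)]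
    apply List.flatMap_congr
    intro dy _
    refine if_congr ?_ rfl rfl
    constructor
    · rintro ⟨h1, h2⟩
      exact ⟨by omega, by omega⟩
    · rintro ⟨h1, h2⟩
      exact ⟨by omega, by omega⟩

lemma coreB (x y r rows cols : Int) :
    (PySem.List.pyRange 0 rows 1).foldl (fun neighbors nx =>
        (PySem.List.pyRange 0 cols 1).foldl (fun neighbors ny =>
          if max |nx - x| |ny - y| ≤ r ∧ ¬(nx = x ∧ ny = y) then
            neighbors ++ [(nx, ny)]
          else neighbors) neighbors) []
    = pvCanon x y r rows cols := by
  rw [fold2_to_flatMap (PySem.List.pyRange 0 rows 1) (PySem.List.pyRange 0 cols 1)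
        (fun nx ny => max |nx - x| |ny - y| ≤ r ∧ ¬(nx = x ∧ ny = y))
        (fun nx ny => (nx, ny))]
  have step : ∀ nx : Int,
      (PySem.List.pyRange 0 cols 1).flatMap (fun ny =>
          if max |nx - x| |ny - y| ≤ r ∧ ¬(nx = x ∧ ny = y)
          then [((nx, ny) : Int × Int)] else [])
      = if (decide (x - r ≤ nx) && decide (nx < x + r + 1)) then
          (PySem.List.pyRange (max 0 (y - r)) (min (cols - 1) (y + r) + 1) 1).flatMap
            (fun ny => if ¬(nx = x ∧ ny = y) then [(nx, ny)] else [])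
        else [] := by
    intro nx
    apply row_step x y nx 0 cols (y - r) (y + r + 1) _ _ (x - r) (x + r + 1)
    · intro ny
      constructor
      · rintro ⟨h1, hc⟩
        have h2 : |nx - x| ≤ r := le_trans (le_max_left _ _) h1
        have h3 : |ny - y| ≤ r := le_trans (le_max_right _ _) h1
        rw [abs_le] at h2 h3
        exact ⟨⟨by omega, by omega⟩, ⟨by omega, by omega⟩, hc⟩
      · rintro ⟨⟨h1, h2⟩, ⟨h3, h4⟩, hc⟩
        refine ⟨max_le (by rw [abs_le]; constructor <;> omega)
          (by rw [abs_le]; constructor <;> omega), hc⟩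
    · rw [filter_pyRange_clamp,
          show min cols (y + r + 1) = min (cols - 1) (y + r) + 1 from by omega]
  rw [List.flatMap_congr (fun nx _ => step nx), flatMap_guard, filter_pyRange_clamp,
      show min rows (x + r + 1) = min (rows - 1) (x + r) + 1 from by omega]
  rfl

-- ===== VERDICT (by name: the statement is the Claim_ definition above) =====
theorem get_neighboring_cells_spec : Claim_equal_get_neighboring_cells := by
  intro x y radius map_size _ hpre
  unfold Pre_get_neighboring_cells at hpre
  unfold Spec_get_neighboring_cells get_neighboring_cells get_neighboring_cells_alt
  obtain ⟨h1, h2⟩ := hpre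
  cases hr : (PySem.Dict.mk map_size).get? "rows" with
  | none => simp [hr] at h1
  | some rows =>
    cases hc : (PySem.Dict.mk map_size).get? "cols" with
    | none => simp [hc] at h2
    | some cols =>
      exact (coreA x y radius rows cols).trans (coreB x y radius rows cols).symm
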